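-- pv_equiv track=rewrite | github.com/xuychen/Joke-Processing | joke/joke-cleaning.py | is_valid_hyphen_word
-- ===== SOURCE A (Python) =====
-- def is_valid_hyphen_word(str):
--     flag = False
--
--     if str[0].isalpha() and str[len(str) - 1].isalpha():
--         for chr in str:
--             if chr.isalpha():
--                 flag = False
--             elif chr == "-":
--                 if flag:
--                     return False
--                 else:
--                     flag = True
--             else:
--                 return False
--         return True
--     return False
-- ===== SOURCE B (Python) =====
-- def is_valid_hyphen_word(str):
--     if not (str[0].isalpha() and str[-1].isalpha()):
--         return False
--     return "--" not in str and all(c.isalpha() or c == "-" for c in str)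
-- ===== Notes on version B (the rewrite author's own statement) =====
-- stated objective: idiomatic
-- what changed: Replaced the stateful char-by-char flag scan with early returns by a stateless one-liner: keep the first/last-isalpha guard, then check that no double hyphen occurs as a substring and every character is a letter or hyphen.
import Mathlib
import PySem

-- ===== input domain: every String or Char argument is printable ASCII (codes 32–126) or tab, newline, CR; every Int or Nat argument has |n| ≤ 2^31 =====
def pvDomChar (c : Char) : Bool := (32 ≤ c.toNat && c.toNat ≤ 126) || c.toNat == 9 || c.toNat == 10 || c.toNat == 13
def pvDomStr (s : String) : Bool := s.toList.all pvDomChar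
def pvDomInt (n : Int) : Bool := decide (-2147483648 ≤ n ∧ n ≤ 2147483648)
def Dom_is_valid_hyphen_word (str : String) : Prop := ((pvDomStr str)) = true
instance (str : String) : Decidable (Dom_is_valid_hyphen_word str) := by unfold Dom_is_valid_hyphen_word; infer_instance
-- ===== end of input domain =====

-- B replaces A's flag-scan with a stateless guard + double-hyphen substring test + all-chars check (idiomatic, same cost).

-- ===== PORT A =====
-- the for-loop over str with the 'flag' state and early returns
def pvLoopA : List Char → Bool → Bool
  | [], _ => true
  | c :: rest, flag =>
    if PySem.Chars.isalpha c then pvLoopA rest false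
    else if c == '-' then (if flag then false else pvLoopA rest true)
    else false

def is_valid_hyphen_word (str : String) : Bool :=
  -- str[0] / str[len(str)-1]; on "" Python raises IndexError (excluded by Pre_)
  match PySem.Str.pyGet? str 0, PySem.Str.pyGet? str (PySem.Str.len str - 1) with
  | some c0, some cl =>
      if PySem.Chars.isalpha c0 && PySem.Chars.isalpha cl then pvLoopA str.toList false
      else false
  | _, _ => false

-- ===== PORT B =====
def is_valid_hyphen_word_alt (str : String) : Bool :=
  -- str[0] / str[-1]; on "" Python raises IndexError (excluded by Pre_)
  match PySem.Str.pyGet? str 0 with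
  | none => false
  | some c0 =>
    match PySem.Str.pyGet? str (-1) with
    | none => false
    | some cl =>
      if !(PySem.Chars.isalpha c0 && PySem.Chars.isalpha cl) then false
      else !(PySem.Str.isIn "--" str) && str.toList.all (fun c => PySem.Chars.isalpha c || c == '-')

-- ===== PRECONDITION & SPEC =====
-- Pre_ excludes only the empty string, on which Python A (str[0]) raises IndexError (B raises there too).
def Pre_is_valid_hyphen_word (str : String) : Prop := str ≠ ""
instance (str : String) : Decidable (Pre_is_valid_hyphen_word str) := by unfold Pre_is_valid_hyphen_word; infer_instance
def pvWitness_is_valid_hyphen_word : String := "well-known"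

def Spec_is_valid_hyphen_word (str : String) (out : Bool) : Prop := out = is_valid_hyphen_word_alt str
instance (str : String) (out : Bool) : Decidable (Spec_is_valid_hyphen_word str out) := by unfold Spec_is_valid_hyphen_word; infer_instance

-- ===== CLAIM (what is proved, stated in full; the proofs are below) =====
def Claim_equal_is_valid_hyphen_word : Prop := ∀ (str : String), Dom_is_valid_hyphen_word str → Pre_is_valid_hyphen_word str → Spec_is_valid_hyphen_word str (is_valid_hyphen_word str)

-- ===== LEMMAS AND PROOFS =====

-- "--" occurs in cs, as a simple recursion
def pvHasDD : List Char → Bool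
  | [] => false
  | c :: rest => (c == '-' && rest.head? == some '-') || pvHasDD rest

theorem pv_alpha_ne_dash {c : Char} (h : PySem.Chars.isalpha c = true) : (c == '-') = false := by
  by_cases hc : c = '-'
  · subst hc; exact absurd h (by decide)
  · simp [hc]

theorem pvHasDD_eq_isIn (cs : List Char) : PySem.Chars.isIn ['-', '-'] cs = pvHasDD cs := by
  induction cs with
  | nil =>
    have h : ¬ (['-', '-'] <:+: ([] : List Char)) := by
      intro h; simpa using h.length_le
    simp [pvHasDD, (PySem.Chars.isIn_eq_false_iff _ _).2 h]
  | cons c rest ih =>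
    rw [show pvHasDD (c :: rest) = ((c == '-' && rest.head? == some '-') || pvHasDD rest) from rfl,
        ← ih, Bool.eq_iff_iff]
    constructor
    · intro h
      rcases List.infix_cons_iff.1 ((PySem.Chars.isIn_iff_infix _ _).1 h) with hp | hi
      · rcases hp with ⟨t, ht⟩
        rcases rest with _ | ⟨d, rest'⟩
        · exact absurd (congrArg List.length ht) (by simp)
        · simp at ht
          simp [← ht.1, ← ht.2.1]
      · simp [(PySem.Chars.isIn_iff_infix _ _).2 hi]
    · intro h
      apply (PySem.Chars.isIn_iff_infix _ _).2
      rcases Bool.or_eq_true_iff.1 h with h' | h'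
      · simp only [Bool.and_eq_true, beq_iff_eq] at h'
        obtain ⟨hc, hh⟩ := h'
        rcases rest with _ | ⟨d, rest'⟩
        · simp at hh
        · simp at hh
          exact List.infix_cons_iff.2 (Or.inl ⟨rest', by simp [hc, hh]⟩)
      · exact List.infix_cons_iff.2 (Or.inr ((PySem.Chars.isIn_iff_infix _ _).1 h'))

theorem pvLoopA_eq (cs : List Char) (flag : Bool) :
    pvLoopA cs flag =
      (!(flag && cs.head? == some '-') &&
        (cs.all (fun c => PySem.Chars.isalpha c || c == '-') && !pvHasDD cs)) := by
  induction cs generalizing flag with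
  | nil => simp [pvLoopA, pvHasDD]
  | cons c rest ih =>
    by_cases ha : PySem.Chars.isalpha c = true
    · have hc := pv_alpha_ne_dash ha
      rw [Bool.eq_iff_iff]
      simp [pvLoopA, ha, ih, pvHasDD, hc]
      try tauto
    · by_cases hd : c = '-'
      · subst hd
        rcases flag with _ | _
        · rw [Bool.eq_iff_iff]
          simp [pvLoopA, ha, ih, pvHasDD]
          try tauto
        · simp [pvLoopA, ha, pvHasDD]
      · simp [pvLoopA, ha, hd, pvHasDD]

theorem pv_pyGet?_last {α : Type} (l : List α) (h : l ≠ []) :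
    PySem.List.pyGet? l ((l.length : Int) - 1) = l.getLast? := by
  have hl : 0 < l.length := List.length_pos_iff.2 h
  have ht : ((l.length : Int) - 1).toNat = l.length - 1 := by omega
  simp only [PySem.List.pyGet?, PySem.List.pyIdx?]
  rw [if_pos (by omega), if_pos (by omega), ht]
  simp [List.getLast?_eq_getElem?]

theorem pv_pyGet?_neg_one {α : Type} (l : List α) (h : l ≠ []) :
    PySem.List.pyGet? l (-1) = l.getLast? := by
  have hl : 0 < l.length := List.length_pos_iff.2 h
  simp only [PySem.List.pyGet?, PySem.List.pyIdx?]
  rw [if_neg (by omega), if_pos (by omega)]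
  simp [List.getLast?_eq_getElem?]

-- ===== VERDICT (by name: the statement is the Claim_ definition above) =====
theorem is_valid_hyphen_word_spec : Claim_equal_is_valid_hyphen_word := by
  intro str _ hpre
  unfold Spec_is_valid_hyphen_word
  unfold is_valid_hyphen_word is_valid_hyphen_word_alt
  have hne : str.toList ≠ [] := by
    intro h; exact hpre (by cases str; simp_all)
  rcases hcs : str.toList with _ | ⟨c0, rest⟩
  · exact absurd hcs hne
  · rcases hgl : str.toList.getLast? with _ | cl
    · rw [List.getLast?_eq_none_iff] at hgl; exact absurd hgl hne
    have h0 : PySem.Str.pyGet? str 0 = some c0 := by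
      simp [PySem.List.pyGet?, PySem.List.pyIdx?, hcs]
    have hlastA : PySem.Str.pyGet? str (PySem.Str.len str - 1) = some cl := by
      simp only [PySem.Str.pyGet?_eq, PySem.Str.len_eq, PySem.Chars.pyGet?_eq_listPyGet?]
      rw [pv_pyGet?_last _ hne, hgl]
    have hlastB : PySem.Str.pyGet? str (-1) = some cl := by
      simp only [PySem.Str.pyGet?_eq, PySem.Chars.pyGet?_eq_listPyGet?]
      rw [pv_pyGet?_neg_one _ hne, hgl]
    rw [h0, hlastA, hlastB]
    dsimp only
    by_cases hg : (PySem.Chars.isalpha c0 && PySem.Chars.isalpha cl) = true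
    · have hga : PySem.Chars.isalpha c0 = true := by
        have := hg; simp only [Bool.and_eq_true] at this; exact this.1
      have hc0 := pv_alpha_ne_dash hga
      rw [pvLoopA_eq, Bool.eq_iff_iff]
      simp [hg, hcs, hc0, pvHasDD_eq_isIn]
      try tauto
    · have hg' : (PySem.Chars.isalpha c0 && PySem.Chars.isalpha cl) = false :=
        Bool.eq_false_iff.2 hg
      simp [hg']
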